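-- pv_equiv track=rewrite | github.com/sapkotagaurav/CSC131 | sapkota_gaurab_hw1.py | column_sum
-- ===== SOURCE A (Python) =====
-- def column_sum(matrix): # a function to check if the sum of columns is 15
--     row = len(matrix)
--     for index in range(len(matrix[0])):
--         total =0
--         for j in range(row):
--             total = total + matrix[j][index]
--         if total != 15:
--             return False
--     return True
-- ===== SOURCE B (Python) =====
-- def column_sum(matrix):
--     ncols = len(matrix[0])
--     sums = [0] * ncols
--     for r in matrix:
--         for c in range(ncols):
--             sums[c] += r[c]
--     return all(s == 15 for s in sums)
-- ===== Notes on version B (the rewrite author's own statement) =====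
-- stated objective: alternative
-- what changed: B makes one row-major pass maintaining a list of running column totals and checks them all at the end, instead of A's column-by-column re-scan of the matrix with early return.
-- outside the precondition, e.g. on column_sum([[1, 2], [3]]): A returns False, B raises IndexError
import Mathlib
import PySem

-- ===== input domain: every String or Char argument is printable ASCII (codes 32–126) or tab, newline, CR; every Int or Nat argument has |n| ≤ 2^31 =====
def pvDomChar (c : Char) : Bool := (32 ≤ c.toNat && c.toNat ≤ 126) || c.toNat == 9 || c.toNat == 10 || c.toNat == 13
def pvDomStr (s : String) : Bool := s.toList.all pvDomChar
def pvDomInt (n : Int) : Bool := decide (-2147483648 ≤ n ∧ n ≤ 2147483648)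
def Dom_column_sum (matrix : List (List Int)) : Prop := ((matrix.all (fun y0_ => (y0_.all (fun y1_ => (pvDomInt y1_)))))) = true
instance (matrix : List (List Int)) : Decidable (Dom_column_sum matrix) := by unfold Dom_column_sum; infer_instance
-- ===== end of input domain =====

-- B replaces A's column-by-column summation (with early return) by one row-major
-- accumulation pass over running column totals, checked against 15 at the end
-- (objective: alternative decomposition; return value only, no mutation involved).

-- ===== PORT A =====
-- inner loop: total = 0; for j in range(row): total += matrix[j][index]
def aColTotal (matrix : List (List Int)) (row : Int) (index : Int) : Int :=
  (PySem.List.pyRange 0 row 1).foldl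
    (fun total j => total + PySem.List.pyGetD (PySem.List.pyGetD matrix j []) index 0) 0

-- outer loop with early 'return False'
def aLoop (matrix : List (List Int)) (row : Int) : List Int → Bool
  | [] => true
  | index :: rest =>
      if aColTotal matrix row index ≠ 15 then false else aLoop matrix row rest

def column_sum (matrix : List (List Int)) : Bool :=
  let row : Int := matrix.length
  aLoop matrix row (PySem.List.pyRange 0 ((PySem.List.pyGetD matrix 0 []).length : Int) 1)

-- ===== PORT B =====
-- inner loop: for c in range(ncols): sums[c] += r[c]
def bAddRow (ncols : Nat) (sums r : List Int) : List Int :=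
  (List.range ncols).foldl
    (fun s c => s.set c (s.getD c 0 + PySem.List.pyGetD r (c : Int) 0)) sums

def column_sum_alt (matrix : List (List Int)) : Bool :=
  let ncols : Nat := (PySem.List.pyGetD matrix 0 []).length
  let sums := matrix.foldl (fun s r => bAddRow ncols s r) (List.replicate ncols 0)
  sums.all (fun s => s == 15)

-- ===== PRECONDITION & SPEC =====
-- Pre_ excludes the empty matrix (A and B both raise IndexError on matrix[0]) and
-- ragged matrices with a row shorter than the first row, on which A either raises
-- IndexError or happens to return False before reaching the short row while B's
-- row-major pass indexes into the short row and raises IndexError.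
def Pre_column_sum (matrix : List (List Int)) : Prop :=
  matrix ≠ [] ∧ ∀ r ∈ matrix, (matrix.headD []).length ≤ r.length
instance (matrix : List (List Int)) : Decidable (Pre_column_sum matrix) := by
  unfold Pre_column_sum; infer_instance
def pvWitness_column_sum : List (List Int) := [[1, 2], [4, 5], [10, 8]]
def Spec_column_sum (matrix : List (List Int)) (out : Bool) : Prop := out = column_sum_alt matrix
instance (matrix : List (List Int)) (out : Bool) : Decidable (Spec_column_sum matrix out) := by unfold Spec_column_sum; infer_instance

-- ===== CLAIM (what is proved, stated in full; the proofs are below) =====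
def Claim_equal_column_sum : Prop := ∀ (matrix : List (List Int)), Dom_column_sum matrix → Pre_column_sum matrix → Spec_column_sum matrix (column_sum matrix)

-- ===== LEMMAS AND PROOFS =====

-- the per-column sum both programs compute
def colSumN (matrix : List (List Int)) (c : Nat) : Int :=
  (matrix.map (fun r => PySem.List.pyGetD r (c : Int) 0)).sum

theorem aColTotal_eq (matrix : List (List Int)) (c : Nat) :
    aColTotal matrix (matrix.length : Int) (c : Int) = colSumN matrix c := by
  unfold aColTotal colSumN
  rw [PySem.List.foldl_pyRange_zero_pyGetD' matrix []
       (fun total r => total + PySem.List.pyGetD r (c : Int) 0) 0,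
     PySem.List.foldl_add]
  simp

theorem aLoop_eq_all (matrix : List (List Int)) (row : Int) (l : List Int) :
    aLoop matrix row l = l.all (fun index => aColTotal matrix row index == 15) := by
  induction l with
  | nil => rfl
  | cons x t ih =>
      simp only [aLoop, List.all_cons, ih]
      split_ifs with h
      · simp [h]
      · simp only [ne_eq, not_not] at h
        simp [h]

theorem bAddRow_length (ncols : Nat) (sums r : List Int) :
    (bAddRow ncols sums r).length = sums.length := by
  unfold bAddRow
  induction List.range ncols generalizing sums with
  | nil => rfl
  | cons c t ih => rw [List.foldl_cons, ih, List.length_set]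

theorem bAddRow_getD (n : Nat) (sums r : List Int) (c : Nat) (h : n ≤ sums.length) :
    (bAddRow n sums r).getD c 0 =
      sums.getD c 0 + (if c < n then PySem.List.pyGetD r (c : Int) 0 else 0) := by
  induction n with
  | zero => simp [bAddRow]
  | succ n ih =>
      have hb : bAddRow (n + 1) sums r =
          (bAddRow n sums r).set n
            ((bAddRow n sums r).getD n 0 + PySem.List.pyGetD r (n : Int) 0) := by
        unfold bAddRow
        rw [List.range_succ, List.foldl_append]
        rfl
      have hn : n ≤ sums.length := Nat.le_of_succ_le h
      have hlen : (bAddRow n sums r).length = sums.length := bAddRow_length n sums r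
      rw [hb]
      rcases Nat.lt_trichotomy c n with hc | hc | hc
      · rw [List.getD_eq_getElem?_getD, List.getElem?_set_ne (by omega),
            ← List.getD_eq_getElem?_getD, ih hn]
        simp [hc, Nat.lt_succ_of_lt hc]
      · subst hc
        rw [List.getD_eq_getElem?_getD, List.getElem?_set_self (by omega),
            Option.getD_some, ih hn]
        simp
      · rw [List.getD_eq_getElem?_getD, List.getElem?_set_ne (by omega),
            ← List.getD_eq_getElem?_getD, ih hn]
        have h1 : ¬ c < n := by omega
        have h2 : ¬ c < n + 1 := by omega
        simp [h1, h2]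

theorem foldl_bAddRow_length (ncols : Nat) (ms : List (List Int)) (init : List Int) :
    (ms.foldl (fun s r => bAddRow ncols s r) init).length = init.length := by
  induction ms generalizing init with
  | nil => rfl
  | cons r t ih => rw [List.foldl_cons, ih, bAddRow_length]

theorem foldl_bAddRow_getD (ncols : Nat) (ms : List (List Int)) (init : List Int)
    (c : Nat) (h : ncols ≤ init.length) :
    (ms.foldl (fun s r => bAddRow ncols s r) init).getD c 0 =
      init.getD c 0 + (if c < ncols then colSumN ms c else 0) := by
  induction ms generalizing init with
  | nil => simp [colSumN]
  | cons r t ih =>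
      rw [List.foldl_cons, ih _ (by rw [bAddRow_length]; exact h),
          bAddRow_getD ncols init r c h]
      unfold colSumN
      split_ifs
      · simp; ring
      · simp

theorem F_eq (matrix : List (List Int)) (n : Nat) :
    matrix.foldl (fun s r => bAddRow n s r) (List.replicate n 0) =
      (List.range n).map (fun c => colSumN matrix c) := by
  apply List.ext_getElem
  · simp [foldl_bAddRow_length]
  · intro i h1 h2
    have hi : i < n := by
      simpa [foldl_bAddRow_length] using h1
    have hg := foldl_bAddRow_getD n matrix (List.replicate n 0) i (by simp)
    rw [← List.getD_eq_getElem _ 0 h1]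
    simp only [List.getElem_map, List.getElem_range]
    rw [hg]
    simp [hi]

theorem column_sum_alt_eq_all (matrix : List (List Int)) :
    column_sum_alt matrix =
      (List.range ((PySem.List.pyGetD matrix 0 []).length)).all
        (fun c => colSumN matrix c == 15) := by
  unfold column_sum_alt
  simp only [F_eq, List.all_map]
  rfl

theorem column_sum_eq_all (matrix : List (List Int)) :
    column_sum matrix =
      (List.range ((PySem.List.pyGetD matrix 0 []).length)).all
        (fun c => colSumN matrix c == 15) := by
  unfold column_sum
  rw [aLoop_eq_all, PySem.List.pyRange_zero_natCast, List.all_map]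
  simp only [Function.comp_def, aColTotal_eq]

-- ===== VERDICT (by name: the statement is the Claim_ definition above) =====
theorem column_sum_spec : Claim_equal_column_sum := by
  intro matrix _ _
  unfold Spec_column_sum
  rw [column_sum_eq_all, column_sum_alt_eq_all]
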